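-- pv_equiv track=rewrite | github.com/YangdongONE/TF-LaC_2024 | classifier.py | get_emo_span
-- ===== SOURCE A (Python) =====
-- def get_emo_span(label_list):
--     span_e = []
--     for i in range(len(label_list)):
--         if label_list[i] == 3:
--             start = i
--             end = i
--             while end+1<len(label_list) and label_list[end+1] == 4:
--                 end += 1
--             span_e.append((start-1,end-1))
--     return span_e
-- ===== SOURCE B (Python) =====
-- def get_emo_span(label_list):
--     # Stage 1: one backward pass builds run_end[i] = end of the 4-run following i (or i itself).
--     n = len(label_list)
--     run_end = []
--     nxt = 0
--     for i in range(n - 1, -1, -1):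
--         e = nxt if i + 1 < n and label_list[i + 1] == 4 else i
--         run_end.append(e)
--         nxt = e
--     run_end.reverse()
--     # Stage 2: a comprehension picks the positions labelled 3.
--     return [(i - 1, e - 1) for i, e in zip(range(n), run_end) if label_list[i] == 3]
-- ===== Notes on version B (the rewrite author's own statement) =====
-- stated objective: alternative
-- what changed: Replaces A's fused forward scan with an inner while over the following 4-run by two staged passes: a backward pass precomputes a run_end table, then a comprehension over zip(range(n), run_end) emits a span for every position labelled 3.
import Mathlib
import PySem

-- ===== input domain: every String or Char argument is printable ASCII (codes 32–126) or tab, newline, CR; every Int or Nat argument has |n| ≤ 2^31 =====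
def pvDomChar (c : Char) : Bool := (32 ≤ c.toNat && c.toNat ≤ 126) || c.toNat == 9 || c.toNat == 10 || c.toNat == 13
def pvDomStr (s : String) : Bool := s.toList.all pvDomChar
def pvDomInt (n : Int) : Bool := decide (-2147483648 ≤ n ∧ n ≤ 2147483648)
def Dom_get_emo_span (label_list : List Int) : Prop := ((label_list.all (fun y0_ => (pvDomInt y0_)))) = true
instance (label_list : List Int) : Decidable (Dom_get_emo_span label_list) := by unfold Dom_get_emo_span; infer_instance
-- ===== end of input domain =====

-- B splits A's fused scan (inner while per 3) into two staged passes: a backward pass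
-- precomputing a run-end table, then a comprehension over the labelled positions;
-- objective: alternative decomposition, same cost.

-- ===== PORT A =====
-- the inner `while end+1<len and label_list[end+1]==4: end+=1` of A
def whileEnd (label : List Int) (e : Nat) : Nat :=
  if h : e + 1 < label.length ∧ label.getD (e+1) 0 = 4 then whileEnd label (e+1) else e
termination_by label.length - e
decreasing_by omega

def get_emo_span (label_list : List Int) : List (Int × Int) :=
  (List.range label_list.length).foldl
    (fun span_e i =>
      if label_list.getD i 0 = 3 then
        span_e ++ [((i : Int) - 1, (whileEnd label_list i : Int) - 1)]
      else span_e) []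

-- ===== PORT B =====
-- Stage 1 of Source B: backward pass appending run-ends, then reversed.
def runEnds (label : List Int) : List Nat :=
  (((List.range label.length).reverse).foldl
    (fun (st : Nat × List Nat) i =>
      let e := if i + 1 < label.length ∧ label.getD (i+1) 0 = 4 then st.1 else i
      (e, st.2 ++ [e])) (0, [])).2.reverse

-- Stage 2 of Source B: the comprehension over zip(range(n), run_end).
def get_emo_span_alt (label_list : List Int) : List (Int × Int) :=
  ((List.range label_list.length).zip (runEnds label_list)).filterMap
    (fun p => if label_list.getD p.1 0 = 3 then some ((p.1 : Int) - 1, (p.2 : Int) - 1) else none)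

-- ===== PRECONDITION & SPEC =====
def Spec_get_emo_span (label_list : List Int) (out : List (Int × Int)) : Prop := out = get_emo_span_alt label_list
instance (label_list : List Int) (out : List (Int × Int)) : Decidable (Spec_get_emo_span label_list out) := by unfold Spec_get_emo_span; infer_instance

-- ===== CLAIM (what is proved, stated in full; the proofs are below) =====
def Claim_equal_get_emo_span : Prop := ∀ (label_list : List Int), Dom_get_emo_span label_list → Spec_get_emo_span label_list (get_emo_span label_list)

-- ===== LEMMAS AND PROOFS =====

lemma zip_self_map {α β : Type} (f : α → β) (l : List α) :
    l.zip (l.map f) = l.map (fun a => (a, f a)) := by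
  induction l with
  | nil => rfl
  | cons x xs ih => simp [ih]

lemma foldlA (label : List Int) (l : List Nat) (acc : List (Int × Int)) :
    l.foldl
      (fun span_e i =>
        if label.getD i 0 = 3 then
          span_e ++ [((i : Int) - 1, (whileEnd label i : Int) - 1)]
        else span_e) acc
    = acc ++ l.filterMap
        (fun j => if label.getD j 0 = 3 then some ((j : Int) - 1, (whileEnd label j : Int) - 1) else none) := by
  induction l generalizing acc with
  | nil => simp
  | cons x xs ih =>
    simp only [List.foldl_cons, List.filterMap_cons, ih]
    split <;> simp

lemma runEnds_go (label : List Int) (i : Nat) :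
    ∀ (p : Nat) (s : List Nat), (i < label.length → p = whileEnd label i) →
      (((List.range i).reverse).foldl
        (fun (st : Nat × List Nat) j =>
          let e := if j + 1 < label.length ∧ label.getD (j+1) 0 = 4 then st.1 else j
          (e, st.2 ++ [e])) (p, s)).2
      = s ++ ((List.range i).map (whileEnd label)).reverse := by
  induction i with
  | zero => intro p s _; simp
  | succ k ih =>
    intro p s hp
    have hrev : (List.range (k+1)).reverse = k :: (List.range k).reverse := by
      rw [List.range_succ]; simp
    rw [hrev, List.foldl_cons]
    have hend : (if k + 1 < label.length ∧ label.getD (k+1) 0 = 4 then p else k)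
        = whileEnd label k := by
      rw [whileEnd]
      split
      · next h => exact hp h.1
      · rfl
    simp only [hend]
    rw [ih (whileEnd label k) _ (fun _ => rfl)]
    simp [List.range_succ]

lemma runEnds_eq (label : List Int) :
    runEnds label = (List.range label.length).map (whileEnd label) := by
  unfold runEnds
  rw [runEnds_go label label.length 0 [] (by omega)]
  simp

-- ===== VERDICT (by name: the statement is the Claim_ definition above) =====
theorem get_emo_span_spec : Claim_equal_get_emo_span := by
  intro label_list _
  unfold Spec_get_emo_span get_emo_span get_emo_span_alt
  rw [foldlA, runEnds_eq]
  rw [zip_self_map (whileEnd label_list) (List.range label_list.length), List.filterMap_map]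
  simp
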